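-- pv_equiv track=rewrite | github.com/charlotte1227226/-_exam | bst.py | left_tree_size
-- ===== SOURCE A (Python) =====
-- def collect_subtree_values(tree, index):
--     if index >= len(tree) or tree[index] == -1:
--         return []
--     left = collect_subtree_values(tree, 2 * index + 1)
--     right = collect_subtree_values(tree, 2 * index + 2)
--     return left + [tree[index]] + right
--
-- def left_tree_size(tree):
--     tree_left_node = [-1] * len(tree)
--     for i in range(len(tree)):
--         if tree[i] == -1:
--             continue
--         subtree = collect_subtree_values(tree, i)
--         smaller = [val for val in subtree if val < tree[i]]
--         tree_left_node[i] = len(smaller) + 1  # +1 includes itself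
--     return tree_left_node
-- ===== SOURCE B (Python) =====
-- def left_tree_size(tree):
--     # Bottom-up pass: sub[i] holds the sorted values of the subtree rooted at i,
--     # built once by merging the children's sorted lists (children have larger
--     # indices, so they are ready); the count of smaller values falls out of the
--     # insertion position.
--     n = len(tree)
--     sub = [[] for _ in range(n)]
--     res = [-1] * n
--     for i in range(n - 1, -1, -1):
--         v = tree[i]
--         if v == -1:
--             continue
--         l = sub[2 * i + 1] if 2 * i + 1 < n else []
--         r = sub[2 * i + 2] if 2 * i + 2 < n else []
--         # merge the two sorted lists
--         merged = []
--         a = 0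
--         b = 0
--         while a < len(l) and b < len(r):
--             if l[a] <= r[b]:
--                 merged.append(l[a])
--                 a += 1
--             else:
--                 merged.append(r[b])
--                 b += 1
--         merged.extend(l[a:])
--         merged.extend(r[b:])
--         # count leading elements smaller than v (= all smaller ones: merged is sorted)
--         c = 0
--         while c < len(merged) and merged[c] < v:
--             c += 1
--         res[i] = c + 1
--         merged.insert(c, v)
--         sub[i] = merged
--     return res
-- ===== Notes on version B (the rewrite author's own statement) =====
-- stated objective: faster
-- what changed: Replaces the per-node top-down recollection of every subtree's values with a single bottom-up pass that keeps one sorted value list per node, merging the two children's lists and reading the smaller-count off the insertion position.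
import Mathlib
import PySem

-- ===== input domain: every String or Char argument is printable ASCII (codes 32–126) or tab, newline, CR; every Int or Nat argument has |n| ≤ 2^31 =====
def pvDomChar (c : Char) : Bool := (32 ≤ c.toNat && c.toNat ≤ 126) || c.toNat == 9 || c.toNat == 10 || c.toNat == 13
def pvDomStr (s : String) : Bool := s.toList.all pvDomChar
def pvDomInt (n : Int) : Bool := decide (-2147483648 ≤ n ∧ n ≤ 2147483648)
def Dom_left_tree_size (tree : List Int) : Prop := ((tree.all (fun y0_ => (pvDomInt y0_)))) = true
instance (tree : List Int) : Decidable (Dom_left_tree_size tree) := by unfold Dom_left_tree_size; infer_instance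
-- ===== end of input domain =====

-- B replaces A's per-node top-down recollection of subtree values by one bottom-up
-- pass keeping a sorted value list per node (merge children, read count off the
-- insertion position); measured constant-factor speed-up.

-- ===== PORT A =====
def collectA (tree : List Int) (i : Nat) : List Int :=
  if h : tree.length ≤ i ∨ tree.getD i 0 = -1 then []
  else collectA tree (2 * i + 1) ++ [tree.getD i 0] ++ collectA tree (2 * i + 2)
termination_by tree.length - i
decreasing_by all_goals omega

def left_tree_size (tree : List Int) : List Int :=
  (List.range tree.length).foldl
    (fun acc i =>
      if tree.getD i 0 = -1 then acc
      else
        acc.set i ((((collectA tree i).filter (fun x => x < tree.getD i 0)).length : Int) + 1))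
    (List.replicate tree.length (-1))

-- ===== PORT B =====
-- merge two sorted lists (B's hand-written merge loop)
def mergeB : List Int → List Int → List Int
  | [], r => r
  | l, [] => l
  | x :: l, y :: r => if x ≤ y then x :: mergeB l (y :: r) else y :: mergeB (x :: l) r

-- B's count-leading-smaller loop fused with the insertion: returns (count, list with v inserted)
def insPosB (v : Int) : List Int → Nat × List Int
  | [] => (0, [v])
  | x :: t =>
      if x < v then
        let p := insPosB v t
        (p.1 + 1, x :: p.2)
      else (0, v :: x :: t)

-- B's main loop, i = k-1 down to 0 over (sub, res)
def loopB (tree : List Int) : Nat → List (List Int) → List Int → List (List Int) × List Int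
  | 0, sub, res => (sub, res)
  | k + 1, sub, res =>
      let v := tree.getD k 0
      if v = -1 then loopB tree k sub res
      else
        let l := sub.getD (2 * k + 1) []
        let r := sub.getD (2 * k + 2) []
        let p := insPosB v (mergeB l r)
        loopB tree k (sub.set k p.2) (res.set k ((p.1 : Int) + 1))

def left_tree_size_alt (tree : List Int) : List Int :=
  (loopB tree tree.length (List.replicate tree.length []) (List.replicate tree.length (-1))).2

-- ===== PRECONDITION & SPEC =====
def Spec_left_tree_size (tree : List Int) (out : List Int) : Prop := out = left_tree_size_alt tree
instance (tree : List Int) (out : List Int) : Decidable (Spec_left_tree_size tree out) := by unfold Spec_left_tree_size; infer_instance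

-- ===== CLAIM (what is proved, stated in full; the proofs are below) =====
def Claim_equal_left_tree_size : Prop := ∀ (tree : List Int), Dom_left_tree_size tree → Spec_left_tree_size tree (left_tree_size tree)

-- ===== LEMMAS AND PROOFS =====

-- the sorted subtree list B maintains at index i
def subS (tree : List Int) (i : Nat) : List Int :=
  if h : tree.length ≤ i ∨ tree.getD i 0 = -1 then []
  else (insPosB (tree.getD i 0) (mergeB (subS tree (2 * i + 1)) (subS tree (2 * i + 2)))).2
termination_by tree.length - i
decreasing_by all_goals omega

-- the value B's loop writes at a processed index i (when tree[i] ≠ -1)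
def resB (tree : List Int) (i : Nat) : Int :=
  ((insPosB (tree.getD i 0) (mergeB (subS tree (2 * i + 1)) (subS tree (2 * i + 2)))).1 : Int) + 1

-- the value A's loop writes at index i (when tree[i] ≠ -1)
def resA (tree : List Int) (i : Nat) : Int :=
  (((collectA tree i).filter (fun x => x < tree.getD i 0)).length : Int) + 1

theorem mergeB_perm (l r : List Int) : (mergeB l r).Perm (l ++ r) := by
  fun_induction mergeB l r with
  | case1 r => simp
  | case2 l h => simp
  | case3 x l y r hxy ih => exact ih.cons x
  | case4 x l y r hxy ih => exact (ih.cons y).trans List.perm_middle.symm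

theorem mergeB_sorted (l r : List Int) (hl : l.Pairwise (· ≤ ·)) (hr : r.Pairwise (· ≤ ·)) :
    (mergeB l r).Pairwise (· ≤ ·) := by
  fun_induction mergeB l r with
  | case1 r => exact hr
  | case2 l h => exact hl
  | case3 x l y r hxy ih =>
    rcases List.pairwise_cons.1 hl with ⟨hx, hl'⟩
    rcases List.pairwise_cons.1 hr with ⟨hy, hr'⟩
    refine List.pairwise_cons.2 ⟨?_, ih hl' hr⟩
    intro a ha
    rcases List.mem_append.1 ((mergeB_perm l (y :: r)).mem_iff.1 ha) with h | h
    · exact hx a h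
    · rcases List.mem_cons.1 h with rfl | h
      · exact hxy
      · exact le_trans hxy (hy a h)
  | case4 x l y r hxy ih =>
    rcases List.pairwise_cons.1 hr with ⟨hy, hr'⟩
    refine List.pairwise_cons.2 ⟨?_, ih hl hr'⟩
    intro a ha
    have hyx : y ≤ x := le_of_lt (lt_of_not_ge hxy)
    rcases List.mem_append.1 ((mergeB_perm (x :: l) r).mem_iff.1 ha) with h | h
    · rcases List.mem_cons.1 h with rfl | h
      · exact hyx
      · exact le_trans hyx (List.pairwise_cons.1 hl |>.1 a h)
    · exact hy a h

theorem insPosB_perm (v : Int) (m : List Int) : ((insPosB v m).2).Perm (v :: m) := by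
  induction m with
  | nil => simp [insPosB]
  | cons x t ih =>
    by_cases h : x < v
    · simpa [insPosB, h] using (ih.cons x).trans (List.Perm.swap v x t)
    · simp [insPosB, h]

theorem insPosB_sorted (v : Int) (m : List Int) (hm : m.Pairwise (· ≤ ·)) :
    ((insPosB v m).2).Pairwise (· ≤ ·) := by
  induction m with
  | nil => simp [insPosB]
  | cons x t ih =>
    rcases List.pairwise_cons.1 hm with ⟨hx, ht⟩
    by_cases h : x < v
    · simp only [insPosB, if_pos h]
      refine List.pairwise_cons.2 ⟨?_, ih ht⟩
      intro a ha
      rcases List.mem_cons.1 ((insPosB_perm v t).mem_iff.1 ha) with rfl | ha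
      · exact le_of_lt h
      · exact hx a ha
    · simp only [insPosB, if_neg h]
      refine List.pairwise_cons.2 ⟨?_, hm⟩
      intro a ha
      rcases List.mem_cons.1 ha with rfl | ha
      · exact le_of_not_gt h
      · exact le_trans (le_of_not_gt h) (hx a ha)

theorem insPosB_count (v : Int) (m : List Int) (hm : m.Pairwise (· ≤ ·)) :
    (insPosB v m).1 = m.countP (fun x => decide (x < v)) := by
  induction m with
  | nil => simp [insPosB]
  | cons x t ih =>
    rcases List.pairwise_cons.1 hm with ⟨hx, ht⟩
    by_cases h : x < v
    · simp [insPosB, h, ih ht]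
    · have : ∀ a ∈ x :: t, ¬ a < v := by
        intro a ha
        rcases List.mem_cons.1 ha with rfl | ha
        · exact h
        · exact fun hav => h (lt_of_le_of_lt (hx a ha) hav)
      simp only [insPosB, if_neg h]
      symm
      rw [List.countP_eq_zero]
      intro a ha
      simpa using this a ha

theorem subS_spec (tree : List Int) (i : Nat) :
    (subS tree i).Pairwise (· ≤ ·) ∧ (subS tree i).Perm (collectA tree i) := by
  fun_induction subS tree i with
  | case1 i h => rw [collectA, dif_pos h]; exact ⟨List.Pairwise.nil, List.Perm.refl _⟩
  | case2 i h ih1 ih2 =>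
    have hs := mergeB_sorted _ _ ih1.1 ih2.1
    constructor
    · exact insPosB_sorted _ _ hs
    · rw [collectA, dif_neg h]
      refine (insPosB_perm _ _).trans ?_
      refine (List.Perm.cons _ ((mergeB_perm _ _).trans (ih1.2.append ih2.2))).trans ?_
      simpa using (List.perm_middle (a := tree.getD i 0)
        (l₁ := collectA tree (2 * i + 1)) (l₂ := collectA tree (2 * i + 2))).symm

theorem resB_eq_resA (tree : List Int) (i : Nat) (hi : i < tree.length)
    (hv : tree.getD i 0 ≠ -1) : resB tree i = resA tree i := by
  have h : ¬ (tree.length ≤ i ∨ tree.getD i 0 = -1) := by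
    push Not; exact ⟨hi, hv⟩
  have hs := mergeB_sorted _ _ (subS_spec tree (2 * i + 1)).1 (subS_spec tree (2 * i + 2)).1
  have hperm : (mergeB (subS tree (2 * i + 1)) (subS tree (2 * i + 2))).Perm
      (collectA tree (2 * i + 1) ++ collectA tree (2 * i + 2)) :=
    (mergeB_perm _ _).trans ((subS_spec tree (2 * i + 1)).2.append (subS_spec tree (2 * i + 2)).2)
  unfold resB resA
  rw [insPosB_count _ _ hs, hperm.countP_eq]
  conv_rhs => rw [collectA]
  rw [dif_neg h]
  simp [List.countP_eq_length_filter]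

theorem getD_set {α : Type} (acc : List α) (i j : Nat) (x d : α) :
    (acc.set i x).getD j d = if i = j ∧ j < acc.length then x else acc.getD j d := by
  simp only [List.getD_eq_getElem?_getD, List.getElem?_set]
  split_ifs with h1 h2 h3 <;> simp_all

theorem foldA_length (tree : List Int) (l : List Nat) (acc : List Int) :
    (l.foldl (fun acc i => if tree.getD i 0 = -1 then acc else acc.set i (resA tree i)) acc).length
      = acc.length := by
  induction l generalizing acc with
  | nil => rfl
  | cons i t ih => simp only [List.foldl_cons]; rw [ih]; split_ifs <;> simp

theorem foldA_getD (tree : List Int) (l : List Nat) (acc : List Int) (j : Nat) :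
    (l.foldl (fun acc i => if tree.getD i 0 = -1 then acc else acc.set i (resA tree i)) acc).getD j 0
      = if j ∈ l ∧ j < acc.length ∧ tree.getD j 0 ≠ -1 then resA tree j else acc.getD j 0 := by
  induction l generalizing acc with
  | nil => simp
  | cons i t ih =>
    simp only [List.foldl_cons]
    rw [ih]
    by_cases hv : tree.getD i 0 = -1
    · rw [if_pos hv]
      by_cases hji : j = i
      · subst hji
        split_ifs with h1 h2 <;> simp_all
      · split_ifs with h1 h2 <;> simp_all
    · rw [if_neg hv, getD_set]
      rw [List.length_set]
      by_cases hji : j = i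
      · subst hji
        split_ifs with h1 h2 <;> simp_all
      · split_ifs with h1 h2 <;> simp_all [Ne.symm hji]

theorem loopB_length (tree : List Int) (k : Nat) (sub : List (List Int)) (res : List Int) :
    (loopB tree k sub res).2.length = res.length := by
  induction k generalizing sub res with
  | zero => rfl
  | succ k ih =>
    simp only [loopB]
    split_ifs <;> rw [ih] <;> simp

theorem subS_oob (tree : List Int) (i : Nat) (h : tree.length ≤ i) : subS tree i = [] := by
  rw [subS, dif_pos (Or.inl h)]

theorem loopB_getD (tree : List Int) (k : Nat) (sub : List (List Int)) (res : List Int) (j : Nat)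
    (hk : k ≤ tree.length) (hsl : sub.length = tree.length)
    (h1 : ∀ i, k ≤ i → sub.getD i [] = subS tree i)
    (h2 : ∀ i, i < k → sub.getD i [] = []) :
    (loopB tree k sub res).2.getD j 0
      = if j < k ∧ j < res.length ∧ tree.getD j 0 ≠ -1 then resB tree j else res.getD j 0 := by
  induction k generalizing sub res with
  | zero => simp [loopB]
  | succ k ih =>
    simp only [loopB]
    by_cases hv : tree.getD k 0 = -1
    · rw [if_pos hv]
      rw [ih sub res (by omega) hsl ?_ (fun i hi => h2 i (by omega))]
      · have hiff : (j < k ∧ j < res.length ∧ tree.getD j 0 ≠ -1)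
            ↔ (j < k + 1 ∧ j < res.length ∧ tree.getD j 0 ≠ -1) := by
          constructor
          · rintro ⟨x1, x2, x3⟩; exact ⟨by omega, x2, x3⟩
          · rintro ⟨x1, x2, x3⟩
            refine ⟨?_, x2, x3⟩
            rcases Nat.lt_succ_iff_lt_or_eq.1 x1 with hlt | rfl
            · exact hlt
            · exact absurd hv x3
        rw [if_congr hiff rfl rfl]
      · intro i hi
        rcases Nat.eq_or_lt_of_le hi with heq | hlt
        · rw [h2 i (by omega), subS, dif_pos (Or.inr (heq ▸ hv))]
        · exact h1 i hlt
    · rw [if_neg hv]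
      have hkn : k < tree.length := by omega
      have hml : (mergeB (sub.getD (2 * k + 1) []) (sub.getD (2 * k + 2) []))
          = mergeB (subS tree (2 * k + 1)) (subS tree (2 * k + 2)) := by
        rw [h1 (2 * k + 1) (by omega), h1 (2 * k + 2) (by omega)]
      rw [ih _ _ (by omega) (by simpa using hsl) ?_ ?_]
      · rw [List.length_set, getD_set]
        by_cases hjk : j = k
        · rw [if_neg (by rintro ⟨hc, -, -⟩; omega)]
          by_cases hjr : j < res.length
          · rw [if_pos ⟨hjk.symm, hjr⟩, if_pos ⟨by omega, hjr, hjk ▸ hv⟩]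
            simp only [resB]
            rw [hml, hjk]
          · rw [if_neg (by rintro ⟨-, hc⟩; omega),
              if_neg (by rintro ⟨-, hc, -⟩; omega)]
        · have hiff : (j < k ∧ j < res.length ∧ tree.getD j 0 ≠ -1)
              ↔ (j < k + 1 ∧ j < res.length ∧ tree.getD j 0 ≠ -1) := by
            constructor
            · rintro ⟨x1, x2, x3⟩; exact ⟨by omega, x2, x3⟩
            · rintro ⟨x1, x2, x3⟩; exact ⟨by omega, x2, x3⟩
          rw [if_congr hiff rfl (if_neg (by rintro ⟨hc, -⟩; exact hjk hc.symm))]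
      · intro i hi
        rcases Nat.eq_or_lt_of_le hi with heq | hlt
        · conv_rhs => rw [subS]
          rw [dif_neg (by push Not; exact ⟨by omega, heq ▸ hv⟩)]
          rw [getD_set, if_pos ⟨heq, by omega⟩, hml, heq]
        · rw [getD_set, if_neg (by omega), h1 i hlt]
      · intro i hi
        rw [getD_set, if_neg (by omega), h2 i (by omega)]

-- ===== VERDICT (by name: the statement is the Claim_ definition above) =====
theorem left_tree_size_spec : Claim_equal_left_tree_size := by
  intro tree _
  unfold Spec_left_tree_size
  have hA : left_tree_size tree
      = (List.range tree.length).foldl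
          (fun acc i => if tree.getD i 0 = -1 then acc else acc.set i (resA tree i))
          (List.replicate tree.length (-1)) := rfl
  have hAl : (left_tree_size tree).length = tree.length := by
    rw [hA, foldA_length]; simp
  have hBl : (left_tree_size_alt tree).length = tree.length := by
    unfold left_tree_size_alt; rw [loopB_length]; simp
  apply List.ext_getElem (by rw [hAl, hBl])
  intro j hj1 hj2
  have hjn : j < tree.length := by omega
  have hrep : (List.replicate tree.length (-1 : Int)).getD j 0 = -1 := by
    rw [List.getD_eq_getElem (hn := by simpa using hjn)]; simp
  have gA : (left_tree_size tree).getD j 0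
      = if tree.getD j 0 = -1 then -1 else resA tree j := by
    rw [hA, foldA_getD]
    simp only [List.mem_range, List.length_replicate]
    by_cases hv : tree.getD j 0 = -1
    · rw [if_neg (by rintro ⟨-, -, hc⟩; exact hc hv), hrep, if_pos hv]
    · rw [if_pos ⟨hjn, hjn, hv⟩, if_neg hv]
  have gB : (left_tree_size_alt tree).getD j 0
      = if tree.getD j 0 = -1 then -1 else resB tree j := by
    unfold left_tree_size_alt
    rw [loopB_getD tree tree.length _ _ j le_rfl (by simp) ?_ ?_]
    · simp only [List.length_replicate]
      by_cases hv : tree.getD j 0 = -1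
      · rw [if_neg (by rintro ⟨-, -, hc⟩; exact hc hv), hrep, if_pos hv]
      · rw [if_pos ⟨hjn, hjn, hv⟩, if_neg hv]
    · intro i hi
      rw [subS_oob tree i hi]
      simp only [List.getD_eq_getElem?_getD, List.getElem?_replicate]
      split <;> rfl
    · intro i hi
      simp only [List.getD_eq_getElem?_getD, List.getElem?_replicate]
      split <;> rfl
  rw [← List.getD_eq_getElem (left_tree_size tree) 0 hj1,
    ← List.getD_eq_getElem (left_tree_size_alt tree) 0 hj2, gA, gB]
  by_cases hv : tree.getD j 0 = -1
  · rw [if_pos hv, if_pos hv]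
  · rw [if_neg hv, if_neg hv, resB_eq_resA tree j hjn hv]
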